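-- pv_equiv track=rewrite | github.com/willpowers2020/lottery-data | app.py | get_game_type
-- ===== SOURCE A (Python) =====
-- def get_game_type(game_name, state_name=''):
--     """Classify game type"""
--     name = game_name.lower()
--     state = state_name.lower()
--
--     if 'nebraska' in state and 'pick 5' in name:
--         return 'cash5'
--
--     if any(x in name for x in ['cash 5', 'cash5', 'fantasy 5', 'fantasy5', 'take 5', 'take5', 'match 5', 'lotto 5']):
--         return 'cash5'
--
--     if any(x in name for x in ['pick 2', 'pick2', 'dc-2', 'dc2', 'cash 2', 'daily 2', 'play 2']):
--         return 'pick2'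
--
--     if any(x in name for x in ['pick 3', 'pick3', 'dc-3', 'dc3', 'cash 3', 'cash3', 'daily 3', 'daily3', 'play 3', 'play3', 'numbers game', 'tri-state pick 3']):
--         return 'pick3'
--
--     if any(x in name for x in ['pick 4', 'pick4', 'dc-4', 'dc4', 'cash 4', 'cash4', 'daily 4', 'daily4', 'play 4', 'play4', 'win 4', 'win4', 'tri-state pick 4']):
--         return 'pick4'
--
--     if any(x in name for x in ['pick 5', 'pick5', 'dc-5', 'dc5', 'daily 5', 'daily5', 'play 5', 'play5', 'georgia five']):
--         return 'pick5'
--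
--     return None
-- ===== SOURCE B (Python) =====
-- # B: one flat keyword->label table scanned ONCE to collect every matched label,
-- # then the answer is selected from the fixed priority order (cash5 < pick2 < pick3 < pick4 < pick5).
-- # Correct because each keyword belongs to exactly one group, so "first group with a match"
-- # equals "highest-priority label among all matches".
--
-- KEYWORDS = [
--     ('cash 5', 'cash5'), ('cash5', 'cash5'), ('fantasy 5', 'cash5'), ('fantasy5', 'cash5'),
--     ('take 5', 'cash5'), ('take5', 'cash5'), ('match 5', 'cash5'), ('lotto 5', 'cash5'),
--     ('pick 2', 'pick2'), ('pick2', 'pick2'), ('dc-2', 'pick2'), ('dc2', 'pick2'),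
--     ('cash 2', 'pick2'), ('daily 2', 'pick2'), ('play 2', 'pick2'),
--     ('pick 3', 'pick3'), ('pick3', 'pick3'), ('dc-3', 'pick3'), ('dc3', 'pick3'),
--     ('cash 3', 'pick3'), ('cash3', 'pick3'), ('daily 3', 'pick3'), ('daily3', 'pick3'),
--     ('play 3', 'pick3'), ('play3', 'pick3'), ('numbers game', 'pick3'), ('tri-state pick 3', 'pick3'),
--     ('pick 4', 'pick4'), ('pick4', 'pick4'), ('dc-4', 'pick4'), ('dc4', 'pick4'),
--     ('cash 4', 'pick4'), ('cash4', 'pick4'), ('daily 4', 'pick4'), ('daily4', 'pick4'),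
--     ('play 4', 'pick4'), ('play4', 'pick4'), ('win 4', 'pick4'), ('win4', 'pick4'),
--     ('tri-state pick 4', 'pick4'),
--     ('pick 5', 'pick5'), ('pick5', 'pick5'), ('dc-5', 'pick5'), ('dc5', 'pick5'),
--     ('daily 5', 'pick5'), ('daily5', 'pick5'), ('play 5', 'pick5'), ('play5', 'pick5'),
--     ('georgia five', 'pick5'),
-- ]
--
-- PRIORITY = ['cash5', 'pick2', 'pick3', 'pick4', 'pick5']
--
-- def get_game_type(game_name, state_name=''):
--     """Classify game type"""
--     name = game_name.lower()
--     if 'nebraska' in state_name.lower() and 'pick 5' in name: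
--         return 'cash5'
--     hits = [label for kw, label in KEYWORDS if kw in name]
--     return next((label for label in PRIORITY if label in hits), None)
-- ===== Notes on version B (the rewrite author's own statement) =====
-- stated objective: alternative
-- what changed: Instead of five sequential early-return any() blocks, B scans one flat keyword-to-label table once to collect ALL matched labels and then selects the winner from a fixed priority list; correct since keywords belong to exactly one group.
import Mathlib
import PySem

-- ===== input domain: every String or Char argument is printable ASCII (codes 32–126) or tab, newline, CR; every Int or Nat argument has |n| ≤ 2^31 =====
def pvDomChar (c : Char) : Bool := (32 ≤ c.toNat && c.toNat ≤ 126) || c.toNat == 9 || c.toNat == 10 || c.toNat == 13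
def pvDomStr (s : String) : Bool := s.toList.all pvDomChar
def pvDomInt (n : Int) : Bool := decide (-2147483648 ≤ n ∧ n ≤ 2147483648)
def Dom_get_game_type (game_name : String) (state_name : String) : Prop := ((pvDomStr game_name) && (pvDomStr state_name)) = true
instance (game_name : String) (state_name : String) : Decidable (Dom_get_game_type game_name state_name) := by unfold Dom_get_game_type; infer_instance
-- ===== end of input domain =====

-- B replaces A's five sequential early-return any() blocks by a single scan of one flat
-- keyword→label table that collects ALL matched labels, followed by a selection from a fixed
-- priority list (objective: alternative decomposition; behaviour proved identical).

-- ===== PORT A =====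
def get_game_type (game_name : String) (state_name : String) : Option String :=
  let name := PySem.Str.lower game_name
  let state := PySem.Str.lower state_name
  if PySem.Str.isIn "nebraska" state && PySem.Str.isIn "pick 5" name then some "cash5"
  else if (["cash 5", "cash5", "fantasy 5", "fantasy5", "take 5", "take5", "match 5", "lotto 5"].any (fun x => PySem.Str.isIn x name)) then some "cash5"
  else if (["pick 2", "pick2", "dc-2", "dc2", "cash 2", "daily 2", "play 2"].any (fun x => PySem.Str.isIn x name)) then some "pick2"
  else if (["pick 3", "pick3", "dc-3", "dc3", "cash 3", "cash3", "daily 3", "daily3", "play 3", "play3", "numbers game", "tri-state pick 3"].any (fun x => PySem.Str.isIn x name)) then some "pick3"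
  else if (["pick 4", "pick4", "dc-4", "dc4", "cash 4", "cash4", "daily 4", "daily4", "play 4", "play4", "win 4", "win4", "tri-state pick 4"].any (fun x => PySem.Str.isIn x name)) then some "pick4"
  else if (["pick 5", "pick5", "dc-5", "dc5", "daily 5", "daily5", "play 5", "play5", "georgia five"].any (fun x => PySem.Str.isIn x name)) then some "pick5"
  else none

-- ===== PORT B =====
def pvKeywords : List (String × String) :=
  [("cash 5", "cash5"), ("cash5", "cash5"), ("fantasy 5", "cash5"), ("fantasy5", "cash5"),
   ("take 5", "cash5"), ("take5", "cash5"), ("match 5", "cash5"), ("lotto 5", "cash5"),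
   ("pick 2", "pick2"), ("pick2", "pick2"), ("dc-2", "pick2"), ("dc2", "pick2"),
   ("cash 2", "pick2"), ("daily 2", "pick2"), ("play 2", "pick2"),
   ("pick 3", "pick3"), ("pick3", "pick3"), ("dc-3", "pick3"), ("dc3", "pick3"),
   ("cash 3", "pick3"), ("cash3", "pick3"), ("daily 3", "pick3"), ("daily3", "pick3"),
   ("play 3", "pick3"), ("play3", "pick3"), ("numbers game", "pick3"), ("tri-state pick 3", "pick3"),
   ("pick 4", "pick4"), ("pick4", "pick4"), ("dc-4", "pick4"), ("dc4", "pick4"),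
   ("cash 4", "pick4"), ("cash4", "pick4"), ("daily 4", "pick4"), ("daily4", "pick4"),
   ("play 4", "pick4"), ("play4", "pick4"), ("win 4", "pick4"), ("win4", "pick4"),
   ("tri-state pick 4", "pick4"),
   ("pick 5", "pick5"), ("pick5", "pick5"), ("dc-5", "pick5"), ("dc5", "pick5"),
   ("daily 5", "pick5"), ("daily5", "pick5"), ("play 5", "pick5"), ("play5", "pick5"),
   ("georgia five", "pick5")]

def pvPriority : List String := ["cash5", "pick2", "pick3", "pick4", "pick5"]

-- first element of `priority` that is a member of `hits` (Python's next(... if label in hits), None)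
def pvFirstIn (priority : List String) (hits : List String) : Option String :=
  match priority with
  | [] => none
  | l :: rest => if hits.contains l then some l else pvFirstIn rest hits

def get_game_type_alt (game_name : String) (state_name : String) : Option String :=
  let name := PySem.Str.lower game_name
  if PySem.Str.isIn "nebraska" (PySem.Str.lower state_name) && PySem.Str.isIn "pick 5" name then some "cash5"
  else
    let hits := (pvKeywords.filter (fun p => PySem.Str.isIn p.1 name)).map Prod.snd
    pvFirstIn pvPriority hits

-- ===== PRECONDITION & SPEC =====
def Spec_get_game_type (game_name : String) (state_name : String) (out : Option String) : Prop := out = get_game_type_alt game_name state_name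
instance (game_name : String) (state_name : String) (out : Option String) : Decidable (Spec_get_game_type game_name state_name out) := by unfold Spec_get_game_type; infer_instance

-- ===== CLAIM (what is proved, stated in full; the proofs are below) =====
def Claim_equal_get_game_type : Prop := ∀ (game_name : String) (state_name : String), Dom_get_game_type game_name state_name → Spec_get_game_type game_name state_name (get_game_type game_name state_name)

-- ===== LEMMAS AND PROOFS =====

-- membership in (filter-then-project) as a single any over the table
theorem contains_map_snd_filter (l : List (String × String)) (f : String × String → Bool) (x : String) :
    ((l.filter f).map Prod.snd).contains x = l.any (fun p => f p && p.2 == x) := by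
  rw [List.contains_eq_any_beq, List.any_map, List.any_filter]
  simp [Function.comp, BEq.comm]

-- ===== VERDICT (by name: the statement is the Claim_ definition above) =====
theorem get_game_type_spec : Claim_equal_get_game_type := by
  intro g s _
  unfold Spec_get_game_type get_game_type get_game_type_alt
  simp only [pvPriority, pvFirstIn, contains_map_snd_filter, pvKeywords,
    List.any_cons, List.any_nil]
  simp
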